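-- pv_equiv track=rewrite | github.com/Akinlua/TN5250_IBMI | modules/api_screen_handler.py | check_for_screen_errors
-- ===== SOURCE A (Python) =====
-- from typing import Dict, List, Tuple, Any
--
-- def check_for_screen_errors(screen: str) -> Tuple[bool, str]:
--     """Check screen content for error messages or invalid states"""
--     lines = screen.split('\n')
--
--     # Common error patterns to check for
--     error_patterns = [
--         "Invalid",
--         "Error",
--         "already exists",
--         "not found",
--         "unauthorized",
--         "access denied",
--         "invalid option",
--         "invalid command",
--         "invalid entry",
--         "duplicate",
--         "cannot",
--         "unable to",
--         "failed"
--     ]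
--
--     # Look for error messages in screen content
--     for line in lines:
--         line_lower = line.lower().strip()
--         for pattern in error_patterns:
--             if pattern.lower() in line_lower and line_lower:
--                 return True, f"Error detected: {line.strip()}"
--
--     # Check for specific success patterns
--     success_patterns = [
--         "added successfully",
--         "updated successfully",
--         "completed successfully",
--         "successful",
--         "added",
--         "updated",
--         "completed"
--     ]
--
--     for line in lines:
--         line_lower = line.lower().strip()
--         for pattern in success_patterns:
--             if pattern.lower() in line_lower and line_lower:
--                 return False, f"Success: {line.strip()}"
--
--     return False, "No errors detected"
-- ===== SOURCE B (Python) =====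
-- def check_for_screen_errors(screen: str):
--     """Single pass: return on first error line; remember first success line; errors win globally."""
--     error_patterns = ["invalid", "error", "already exists", "not found",
--                       "unauthorized", "access denied", "invalid option",
--                       "invalid command", "invalid entry", "duplicate",
--                       "cannot", "unable to", "failed"]
--     success_patterns = ["added successfully", "updated successfully",
--                         "completed successfully", "successful",
--                         "added", "updated", "completed"]
--     success = None
--     for line in screen.split('\n'):
--         low = line.lower().strip()
--         if not low:
--             continue
--         if any(p in low for p in error_patterns):
--             return True, f"Error detected: {line.strip()}"
--         if success is None and any(p in low for p in success_patterns):
--             success = (False, f"Success: {line.strip()}")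
--     return success if success is not None else (False, "No errors detected")
-- ===== Notes on version B (the rewrite author's own statement) =====
-- stated objective: alternative
-- what changed: A scans all lines twice (one full pass for error patterns, then a second full pass for success patterns); B makes a single pass that returns on the first error line and remembers the first success line in a variable, reporting it only if no later line matches an error pattern.
import Mathlib
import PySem

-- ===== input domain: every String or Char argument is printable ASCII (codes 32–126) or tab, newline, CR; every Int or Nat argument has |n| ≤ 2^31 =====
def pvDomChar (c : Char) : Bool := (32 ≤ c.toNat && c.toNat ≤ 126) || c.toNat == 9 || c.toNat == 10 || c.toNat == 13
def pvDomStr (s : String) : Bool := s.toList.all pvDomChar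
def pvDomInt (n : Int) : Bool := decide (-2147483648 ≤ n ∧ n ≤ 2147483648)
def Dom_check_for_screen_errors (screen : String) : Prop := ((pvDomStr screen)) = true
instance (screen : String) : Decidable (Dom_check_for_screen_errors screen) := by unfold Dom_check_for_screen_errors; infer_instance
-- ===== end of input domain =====

-- B is a single pass over the lines (first error returns immediately, first success is
-- remembered and reported only if no error appears later), replacing A's two full scans;
-- objective: alternative decomposition (one pass instead of two), same exact results.

-- ===== PORT A =====
def pvErrPatternsA : List String :=
  ["Invalid", "Error", "already exists", "not found", "unauthorized", "access denied",
   "invalid option", "invalid command", "invalid entry", "duplicate", "cannot",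
   "unable to", "failed"]

def pvSuccPatternsA : List String :=
  ["added successfully", "updated successfully", "completed successfully",
   "successful", "added", "updated", "completed"]

-- A's 'for line in lines: … for pattern in pats: if …: return strip(line)' as Option
def pvScanA (pats : List String) (lines : List String) : Option String :=
  match lines with
  | [] => none
  | l :: rest =>
    let ll := PySem.Str.strip (PySem.Str.lower l)
    if pats.any (fun p => PySem.Str.isIn (PySem.Str.lower p) ll && !(ll == "")) then
      some (PySem.Str.strip l)
    else pvScanA pats rest

def check_for_screen_errors (screen : String) : Bool × String :=
  let lines := (PySem.Str.split? screen "\n").getD []   -- sep "\n" ≠ "", always some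
  match pvScanA pvErrPatternsA lines with
  | some s => (true, "Error detected: " ++ s)
  | none =>
    match pvScanA pvSuccPatternsA lines with
    | some s => (false, "Success: " ++ s)
    | none => (false, "No errors detected")

-- ===== PORT B =====
def pvErrPatternsB : List String :=
  ["invalid", "error", "already exists", "not found", "unauthorized", "access denied",
   "invalid option", "invalid command", "invalid entry", "duplicate", "cannot",
   "unable to", "failed"]

def pvSuccPatternsB : List String :=
  ["added successfully", "updated successfully", "completed successfully",
   "successful", "added", "updated", "completed"]

-- B's single loop; 'success' accumulator carries the stored (False, "Success: …") pair
def pvScanB (lines : List String) (success : Option (Bool × String)) : Bool × String :=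
  match lines with
  | [] =>
    match success with
    | some r => r
    | none => (false, "No errors detected")
  | l :: rest =>
    let low := PySem.Str.strip (PySem.Str.lower l)
    if low == "" then pvScanB rest success
    else if pvErrPatternsB.any (fun p => PySem.Str.isIn p low) then
      (true, "Error detected: " ++ PySem.Str.strip l)
    else if success.isNone && pvSuccPatternsB.any (fun p => PySem.Str.isIn p low) then
      pvScanB rest (some (false, "Success: " ++ PySem.Str.strip l))
    else pvScanB rest success

def check_for_screen_errors_alt (screen : String) : Bool × String :=
  pvScanB ((PySem.Str.split? screen "\n").getD []) none

-- ===== PRECONDITION & SPEC =====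
def Spec_check_for_screen_errors (screen : String) (out : Bool × String) : Prop := out = check_for_screen_errors_alt screen
instance (screen : String) (out : Bool × String) : Decidable (Spec_check_for_screen_errors screen out) := by unfold Spec_check_for_screen_errors; infer_instance

-- ===== CLAIM (what is proved, stated in full; the proofs are below) =====
def Claim_equal_check_for_screen_errors : Prop := ∀ (screen : String), Dom_check_for_screen_errors screen → Spec_check_for_screen_errors screen (check_for_screen_errors screen)

-- ===== LEMMAS AND PROOFS =====

lemma pvErrB_eq_map : pvErrPatternsB = pvErrPatternsA.map PySem.Str.lower := by decide

lemma pvSuccB_eq_map : pvSuccPatternsB = pvSuccPatternsA.map PySem.Str.lower := by decide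

-- A's per-line condition equals B's, once the line is known non-empty after strip/lower
lemma pvAnyA_eq_anyB (patsA patsB : List String) (h : patsB = patsA.map PySem.Str.lower)
    (ll : String) (hll : (ll == "") = false) :
    patsA.any (fun p => PySem.Str.isIn (PySem.Str.lower p) ll && !(ll == ""))
      = patsB.any (fun p => PySem.Str.isIn p ll) := by
  subst h
  simp [List.any_map, Function.comp_def, PySem.Str.toList_lower, hll]

-- main invariant: one pass with a stored success equals the two scans of A
set_option maxHeartbeats 1600000 in
lemma pvScanB_eq (lines : List String) (acc : Option String) :
    pvScanB lines (acc.map (fun s => (false, "Success: " ++ s)))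
      = match pvScanA pvErrPatternsA lines with
        | some s => (true, "Error detected: " ++ s)
        | none =>
          match acc with
          | some s => (false, "Success: " ++ s)
          | none =>
            match pvScanA pvSuccPatternsA lines with
            | some s => (false, "Success: " ++ s)
            | none => (false, "No errors detected") := by
  induction lines generalizing acc with
  | nil => cases acc <;> simp [pvScanB, pvScanA]
  | cons l rest ih =>
    simp only [pvScanB, pvScanA]
    set ll := PySem.Str.strip (PySem.Str.lower l) with hllDef
    by_cases hll : (ll == "") = true
    · have h1 : (pvErrPatternsA.any
          (fun p => PySem.Str.isIn (PySem.Str.lower p) ll && !(ll == ""))) = false := by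
        simp [hll]
      have h2 : (pvSuccPatternsA.any
          (fun p => PySem.Str.isIn (PySem.Str.lower p) ll && !(ll == ""))) = false := by
        simp [hll]
      rw [if_pos hll, h1, h2]
      simp only [Bool.false_eq_true, if_false]
      exact ih acc
    · have hll' : (ll == "") = false := by
        cases hb : (ll == "") with
        | true => exact absurd hb hll
        | false => rfl
      rw [if_neg hll,
          pvAnyA_eq_anyB pvErrPatternsA pvErrPatternsB pvErrB_eq_map ll hll',
          pvAnyA_eq_anyB pvSuccPatternsA pvSuccPatternsB pvSuccB_eq_map ll hll']
      by_cases herr : (pvErrPatternsB.any (fun p => PySem.Str.isIn p ll)) = true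
      · rw [if_pos herr, if_pos herr]
      · rw [if_neg herr, if_neg herr]
        cases acc with
        | some s =>
          simp only [Option.map_some, Option.isNone_some, Bool.false_and,
            Bool.false_eq_true, if_false]
          simpa only [Option.map_some] using ih (some s)
        | none =>
          simp only [Option.map_none, Option.isNone_none, Bool.true_and]
          by_cases hsucc : (pvSuccPatternsB.any (fun p => PySem.Str.isIn p ll)) = true
          · rw [if_pos hsucc, if_pos hsucc]
            simpa only [Option.map_some] using ih (some (PySem.Str.strip l))
          · rw [if_neg hsucc, if_neg hsucc]
            simpa only [Option.map_none] using ih none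

-- ===== VERDICT (by name: the statement is the Claim_ definition above) =====
theorem check_for_screen_errors_spec : Claim_equal_check_for_screen_errors := by
  intro screen _
  unfold Spec_check_for_screen_errors check_for_screen_errors check_for_screen_errors_alt
  have h := pvScanB_eq ((PySem.Str.split? screen "\n").getD []) none
  simp only [Option.map_none] at h
  rw [h]
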